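-- pv_equiv track=rewrite | github.com/ArielBanay/Python-Assignments | HW3/HW3.py | remove_from_data
-- ===== SOURCE A (Python) =====
-- def remove_from_data(inverted_index, sequences_data, seq_id):
--     '''
--     The function receives two dictionaries that constitute a database, in addition it receives an ID number of a
--     sequence that exists in the database. The function removes the data referring to this sequence from the dictionaries
--     and returns the same dictionaries after the update.
--
--     Args:
--         inverted_index(dict): A dictionary in which the keys are amino acids and the values are dictionaries in which the keys are the identification number of the DNA sequence in which the amino acid is found,
--         and the value is the number of occurrences of the amino acid in that sequence.
--         sequences_data(dict): A dictionary containing the amino acid chain length for each DNA sequence from the input dictionary (values),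
--         and a serial number for each sequence corresponding to the input dictionary (key)
--         seq_id(int): ID number of the sequence that we want to remove from the database.
--
--     Return:
--         inverted_index(dict): A dictionary in which the keys are amino acids and the values are dictionaries in which the keys are the identification number of the DNA sequence in which the amino acid is found,
--         and the value is the number of occurrences of the amino acid in that sequence. After we have removed the data of the sequence.
--         sequences_data(dict): A dictionary containing the amino acid chain length for each DNA sequence from the input dictionary (values),
--         and a serial number for each sequence corresponding to the input dictionary (key). After we have removed the data of the sequence.
--     '''
--     #Checks for each entry of the main dictionary (which is also a dictionary in itself), whether 'SEQ_ID' is in it as a key and deletes it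
--     for v in list(inverted_index.values()):
--         if seq_id in v.keys():
--             v.pop(seq_id)
--     #Checks for each of the primary keys whether they are left as 'key' with no value and removes them from the primary dictionary.
--     for k in list(inverted_index.keys()):
--         if inverted_index[k]=={}:
--             inverted_index.pop(k)
--     #Removes the requested sequence number from the 'sequences_data' dictionary.
--     sequences_data.pop(seq_id)
--     return inverted_index,sequences_data
-- ===== SOURCE B (Python) =====
-- def remove_from_data(inverted_index, sequences_data, seq_id):
--     # Single rebuild pass: keep each word's postings minus seq_id, dropping words
--     # whose postings come out empty, instead of A's mutate-then-sweep two passes.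
--     # (A mutates the inner dicts in place; B installs freshly built inner dicts,
--     # but leaves the same contents in the same outer dict objects.)
--     new_index = {}
--     for word, inner in inverted_index.items():
--         kept = {s: c for s, c in inner.items() if s != seq_id}
--         if kept:
--             new_index[word] = kept
--     inverted_index.clear()
--     inverted_index.update(new_index)
--     del sequences_data[seq_id]
--     return inverted_index, sequences_data
-- ===== Notes on version B (the rewrite author's own statement) =====
-- stated objective: simpler
-- what changed: A's three steps (mutate every inner dict, then a second sweep deleting now-empty keys, then pop) become a single rebuild pass that filters each inner dict and keeps only words with nonempty remains; Pre_ excludes a missing seq_id (A raises KeyError) and association lists with duplicate keys, which represent no Python dict input.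
import Mathlib
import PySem

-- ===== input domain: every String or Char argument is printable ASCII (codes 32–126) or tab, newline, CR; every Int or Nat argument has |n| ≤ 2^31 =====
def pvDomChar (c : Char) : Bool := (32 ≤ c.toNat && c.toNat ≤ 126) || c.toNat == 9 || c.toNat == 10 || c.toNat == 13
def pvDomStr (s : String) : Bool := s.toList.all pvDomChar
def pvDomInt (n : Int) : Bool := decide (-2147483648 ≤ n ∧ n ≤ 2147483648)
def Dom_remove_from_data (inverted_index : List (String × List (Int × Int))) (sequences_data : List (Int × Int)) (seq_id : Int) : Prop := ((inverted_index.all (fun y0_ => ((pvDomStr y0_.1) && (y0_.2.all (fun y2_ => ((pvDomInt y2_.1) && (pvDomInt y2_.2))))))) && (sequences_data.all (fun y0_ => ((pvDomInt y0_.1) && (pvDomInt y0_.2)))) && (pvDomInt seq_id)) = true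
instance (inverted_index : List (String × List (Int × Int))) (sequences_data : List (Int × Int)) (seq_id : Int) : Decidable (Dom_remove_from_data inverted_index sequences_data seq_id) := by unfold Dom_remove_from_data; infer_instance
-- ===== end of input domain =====

-- B replaces A's two-pass mutate-then-sweep with a single rebuild pass (filter each
-- inner dict, drop entries that come out empty); return value proved equal on Pre_.
-- (Both Pythons mutate their dict arguments; the theorems are about the return value.)

-- ===== PORT A =====

-- dict.pop(k) / del d[k] on an association list: remove the first pair with key k
def pvPopPair {α β : Type} [BEq α] : List (α × β) → α → List (α × β)
  | [], _ => []
  | q :: rest, k => if q.1 == k then rest else q :: pvPopPair rest k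

def remove_from_data (inverted_index : List (String × List (Int × Int))) (sequences_data : List (Int × Int)) (seq_id : Int) : (List (String × List (Int × Int))) × (List (Int × Int)) :=
  -- first pass: for v in list(inverted_index.values()): if seq_id in v.keys(): v.pop(seq_id)
  let ii1 := inverted_index.map (fun p =>
    if p.2.any (fun q => q.1 == seq_id) then (p.1, pvPopPair p.2 seq_id) else p)
  -- second pass: for k in list(inverted_index.keys()): if inverted_index[k]=={}: inverted_index.pop(k)
  let ii2 := (ii1.map (·.1)).foldl (fun d k =>
    match d.find? (fun p => p.1 == k) with
    | some pr => if pr.2 = [] then pvPopPair d k else d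
    | none => d) ii1
  -- sequences_data.pop(seq_id)  (KeyError when absent: excluded by Pre_)
  (ii2, pvPopPair sequences_data seq_id)

-- ===== PORT B =====

def remove_from_data_alt (inverted_index : List (String × List (Int × Int))) (sequences_data : List (Int × Int)) (seq_id : Int) : (List (String × List (Int × Int))) × (List (Int × Int)) :=
  -- one loop: kept = {s: c for s, c in inner.items() if s != seq_id}; keep word iff kept
  let newIndex := inverted_index.foldl (fun acc p =>
    let kept := p.2.filter (fun q => decide (q.1 ≠ seq_id))
    if kept.isEmpty then acc else acc ++ [(p.1, kept)]) []
  -- del sequences_data[seq_id]  (KeyError when absent: excluded by Pre_)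
  (newIndex, pvPopPair sequences_data seq_id)

-- ===== PRECONDITION & SPEC =====

-- Pre_ excludes (a) seq_id absent from sequences_data, where A (and B) raise KeyError, and
-- (b) association lists with duplicate keys (outer, or inside an inner dict), which do not
-- represent any Python dict input at all.
def Pre_remove_from_data (inverted_index : List (String × List (Int × Int))) (sequences_data : List (Int × Int)) (seq_id : Int) : Prop :=
  (inverted_index.map (·.1)).Nodup ∧ (∀ p ∈ inverted_index, (p.2.map (·.1)).Nodup) ∧ seq_id ∈ sequences_data.map (·.1)
instance (inverted_index : List (String × List (Int × Int))) (sequences_data : List (Int × Int)) (seq_id : Int) : Decidable (Pre_remove_from_data inverted_index sequences_data seq_id) := by unfold Pre_remove_from_data; infer_instance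

def pvWitness_remove_from_data : (List (String × List (Int × Int))) × (List (Int × Int)) × Int :=
  ([("A", [(1, 2), (2, 1)]), ("C", [(1, 1)])], [(1, 3), (2, 4)], 1)

def Spec_remove_from_data (inverted_index : List (String × List (Int × Int))) (sequences_data : List (Int × Int)) (seq_id : Int) (out : (List (String × List (Int × Int))) × (List (Int × Int))) : Prop := out = remove_from_data_alt inverted_index sequences_data seq_id
instance (inverted_index : List (String × List (Int × Int))) (sequences_data : List (Int × Int)) (seq_id : Int) (out : (List (String × List (Int × Int))) × (List (Int × Int))) : Decidable (Spec_remove_from_data inverted_index sequences_data seq_id out) := by unfold Spec_remove_from_data; infer_instance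

-- ===== CLAIM (what is proved, stated in full; the proofs are below) =====
def Claim_equal_remove_from_data : Prop := ∀ (inverted_index : List (String × List (Int × Int))) (sequences_data : List (Int × Int)) (seq_id : Int), Dom_remove_from_data inverted_index sequences_data seq_id → Pre_remove_from_data inverted_index sequences_data seq_id → Spec_remove_from_data inverted_index sequences_data seq_id (remove_from_data inverted_index sequences_data seq_id)

-- ===== LEMMAS AND PROOFS =====

-- under unique keys, popping key k equals filtering k out
theorem pvPopPair_eq_filter {β : Type} (l : List (Int × β)) (k : Int)
    (h : (l.map (·.1)).Nodup) : pvPopPair l k = l.filter (fun q => decide (q.1 ≠ k)) := by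
  induction l with
  | nil => rfl
  | cons q rest ih =>
    simp only [List.map_cons, List.nodup_cons, List.mem_map] at h
    by_cases hq : q.1 = k
    · have hrest : rest.filter (fun q => decide (q.1 ≠ k)) = rest := by
        rw [List.filter_eq_self]
        intro a ha
        simp only [ne_eq, decide_eq_true_eq]
        intro hak
        exact h.1 ⟨a, ha, by rw [hak, hq]⟩
      simp only [pvPopPair, hq, beq_self_eq_true, if_true, List.filter_cons, ne_eq,
        decide_not, decide_true]
      simpa [ne_eq, decide_not] using hrest.symm
    · simp only [pvPopPair, beq_iff_eq, if_false, List.filter_cons,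
        ne_eq, hq, not_false_eq_true, decide_true, if_true, ih h.2]

-- popping a key absent from the head leaves the head
theorem pvPopPair_cons_ne {β : Type} (p : String × β) (d : List (String × β)) (k : String)
    (h : ¬ p.1 = k) : pvPopPair (p :: d) k = p :: pvPopPair d k := by
  simp [pvPopPair, h]

-- A's second pass, folded over keys not containing p.1, skips p
theorem foldl_sweep_cons (keys : List String) (d : List (String × List (Int × Int)))
    (p : String × List (Int × Int)) (h : p.1 ∉ keys) :
    keys.foldl (fun d k =>
      match d.find? (fun p => p.1 == k) with
      | some pr => if pr.2 = [] then pvPopPair d k else d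
      | none => d) (p :: d)
    = p :: keys.foldl (fun d k =>
      match d.find? (fun p => p.1 == k) with
      | some pr => if pr.2 = [] then pvPopPair d k else d
      | none => d) d := by
  induction keys generalizing d with
  | nil => rfl
  | cons k ks ih =>
    simp only [List.mem_cons, not_or] at h
    have hne : ¬ p.1 = k := h.1
    simp only [List.foldl_cons]
    have hfind : (p :: d).find? (fun q => q.1 == k) = d.find? (fun q => q.1 == k) := by
      rw [List.find?_cons_of_neg]
      simp [hne]
    rw [hfind]
    cases hf : d.find? (fun q => q.1 == k) with
    | none => exact ih d h.2
    | some pr =>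
      by_cases hpr : pr.2 = []
      · simp only [hpr, if_true]
        rw [pvPopPair_cons_ne p d k hne]
        exact ih _ h.2
      · simp only [hpr, if_false]
        exact ih d h.2

-- A's second pass over a nodup-keyed dict removes exactly the empty entries
theorem sweep_eq_filter (d : List (String × List (Int × Int)))
    (h : (d.map (·.1)).Nodup) :
    (d.map (·.1)).foldl (fun d k =>
      match d.find? (fun p => p.1 == k) with
      | some pr => if pr.2 = [] then pvPopPair d k else d
      | none => d) d
    = d.filter (fun p => !p.2.isEmpty) := by
  induction d with
  | nil => rfl
  | cons p rest ih =>
    simp only [List.map_cons, List.nodup_cons] at h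
    simp only [List.map_cons, List.foldl_cons]
    have hfind : (p :: rest).find? (fun q => q.1 == p.1) = some p := by
      rw [List.find?_cons_of_pos]
      simp
    rw [hfind]
    by_cases hp : p.2 = []
    · have hpop : pvPopPair (p :: rest) p.1 = rest := by simp [pvPopPair]
      simp only [if_true, hpop, List.filter_cons, hp, List.isEmpty_nil, Bool.not_true]
      exact ih h.2
    · simp only [hp, if_false]
      rw [foldl_sweep_cons _ rest p h.1]
      have hne : p.2.isEmpty = false := by
        simp [hp]
      simp only [List.filter_cons, hne, Bool.not_false, if_true]
      rw [ih h.2]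
    
-- B's append-building loop is a filter of a map
theorem foldl_build_eq_filter_map (l : List (String × List (Int × Int))) (seq_id : Int)
    (acc : List (String × List (Int × Int))) :
    l.foldl (fun acc p =>
      let kept := p.2.filter (fun q => decide (q.1 ≠ seq_id))
      if kept.isEmpty then acc else acc ++ [(p.1, kept)]) acc
    = acc ++ (l.map (fun p => (p.1, p.2.filter (fun q => decide (q.1 ≠ seq_id))))).filter
        (fun p => !p.2.isEmpty) := by
  induction l generalizing acc with
  | nil => simp
  | cons p rest ih =>
    simp only [List.foldl_cons, List.map_cons, List.filter_cons]
    by_cases hk : (p.2.filter (fun q => decide (q.1 ≠ seq_id))).isEmpty = true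
    · simp only [hk, if_true, Bool.not_true]
      exact ih acc
    · simp only [Bool.not_eq_true] at hk
      simp only [hk, Bool.not_false, if_true]
      rw [if_neg (by simp)]
      rw [ih (acc ++ [(p.1, p.2.filter (fun q => decide (q.1 ≠ seq_id)))])]
      simp

-- A's first pass equals the per-entry filter, entrywise, under nodup inner keys
theorem pass1_entry (p : String × List (Int × Int)) (seq_id : Int)
    (h : (p.2.map (·.1)).Nodup) :
    (if p.2.any (fun q => q.1 == seq_id) then (p.1, pvPopPair p.2 seq_id) else p)
    = (p.1, p.2.filter (fun q => decide (q.1 ≠ seq_id))) := by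
  by_cases ha : p.2.any (fun q => q.1 == seq_id) = true
  · simp only [ha, if_true, pvPopPair_eq_filter p.2 seq_id h]
  · rw [if_neg ha]
    have : p.2.filter (fun q => decide (q.1 ≠ seq_id)) = p.2 := by
      rw [List.filter_eq_self]
      intro a hmem
      simp only [List.any_eq_true, not_exists, not_and] at ha
      have := ha a hmem
      simp only [beq_iff_eq] at this
      simp [this]
    rw [this]

-- ===== VERDICT (by name: the statement is the Claim_ definition above) =====
theorem remove_from_data_spec : Claim_equal_remove_from_data := by
  intro ii sd seq_id _hdom hpre
  obtain ⟨hout, hin, _hsd⟩ := hpre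
  unfold Spec_remove_from_data remove_from_data remove_from_data_alt
  have hmap : ii.map (fun p =>
      if p.2.any (fun q => q.1 == seq_id) then (p.1, pvPopPair p.2 seq_id) else p)
      = ii.map (fun p => (p.1, p.2.filter (fun q => decide (q.1 ≠ seq_id)))) :=
    List.map_congr_left (fun p hp => pass1_entry p seq_id (hin p hp))
  simp only [hmap]
  have hkeys : ((ii.map (fun p => (p.1, p.2.filter (fun q => decide (q.1 ≠ seq_id))))).map (·.1))
      = ii.map (·.1) := by
    simp [List.map_map, Function.comp]
  have hnd : ((ii.map (fun p => (p.1, p.2.filter (fun q => decide (q.1 ≠ seq_id))))).map (·.1)).Nodup := by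
    rw [hkeys]; exact hout
  rw [sweep_eq_filter _ hnd, foldl_build_eq_filter_map ii seq_id []]
  simp
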